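-- pv_equiv track=rewrite | github.com/veya2ztn/sci-bert-finetune | uniem-train/fullpaper_dataset.py | create_entire_question_answer_mapping_from_pair
-- ===== SOURCE A (Python) =====
-- from collections import defaultdict
--
-- def create_entire_question_answer_mapping_from_pair(question_answer_pair):
--     question_to_answer  = defaultdict(list)
--     answer_to_question  = defaultdict(list)
--     question_to_pos     = {}
--     answer_to_pos       = {}
--     pos_to_question     = []
--     pos_to_answer       = []
--     for i,(k,v) in enumerate(question_answer_pair):
--         question_to_answer[k].append(v)
--         answer_to_question[v].append(k)
--         if k not in question_to_pos:
--             question_to_pos[k] = len(question_to_pos) # map question1 into 1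
--             pos_to_question.append(k) # map 1 into question1
--         if v not in answer_to_pos:
--             answer_to_pos[v] = len(answer_to_pos)
--             pos_to_answer.append(v)
--     return question_to_answer, answer_to_question, question_to_pos, answer_to_pos, pos_to_question, pos_to_answer
-- ===== SOURCE B (Python) =====
-- def create_entire_question_answer_mapping_from_pair(question_answer_pair):
--     pos_to_question = list(dict.fromkeys(k for k, _ in question_answer_pair))
--     pos_to_answer   = list(dict.fromkeys(v for _, v in question_answer_pair))
--     question_to_answer = {k: [v for k2, v in question_answer_pair if k2 == k]
--                           for k in pos_to_question}
--     answer_to_question = {v: [k for k, v2 in question_answer_pair if v2 == v]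
--                           for v in pos_to_answer}
--     question_to_pos = {k: i for i, k in enumerate(pos_to_question)}
--     answer_to_pos   = {v: i for i, v in enumerate(pos_to_answer)}
--     return (question_to_answer, answer_to_question,
--             question_to_pos, answer_to_pos, pos_to_question, pos_to_answer)
-- ===== Notes on version B (the rewrite author's own statement) =====
-- stated objective: alternative
-- what changed: B replaces A's single stateful pass (six accumulators with inline first-appearance guards) by a grouping approach: dedup the question/answer columns first, then build each multimap by a filter scan over the pair list per distinct key, and the index dicts by enumeration; it trades A's O(n) incremental build for O(n*d) nested scans in exchange for a stateless, declarative decomposition.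
import Mathlib
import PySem

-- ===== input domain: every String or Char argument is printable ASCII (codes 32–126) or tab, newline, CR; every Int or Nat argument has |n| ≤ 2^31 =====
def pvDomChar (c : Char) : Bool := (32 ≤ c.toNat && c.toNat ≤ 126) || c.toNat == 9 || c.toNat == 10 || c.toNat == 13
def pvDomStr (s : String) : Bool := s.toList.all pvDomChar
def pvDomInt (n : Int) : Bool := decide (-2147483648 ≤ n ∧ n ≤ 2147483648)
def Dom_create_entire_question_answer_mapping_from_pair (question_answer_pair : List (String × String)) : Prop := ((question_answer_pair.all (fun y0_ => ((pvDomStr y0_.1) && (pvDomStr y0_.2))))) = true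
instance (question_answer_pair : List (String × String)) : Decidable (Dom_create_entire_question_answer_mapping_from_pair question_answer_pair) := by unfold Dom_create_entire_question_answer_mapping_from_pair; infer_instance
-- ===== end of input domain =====

-- B is a grouping re-implementation: dedup the question/answer columns first, then build each
-- multimap by a per-key filter scan and the index dicts by enumeration (alternative decomposition,
-- not faster).


-- ===== PORT A =====
-- loop body of A (the enumerate index i is bound but unused, as in the Python)
def pvStepA (st : PySem.Dict String (List String) × PySem.Dict String (List String) ×
    PySem.Dict String Int × PySem.Dict String Int × List String × List String)
    (p : Int × (String × String)) :
    PySem.Dict String (List String) × PySem.Dict String (List String) ×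
    PySem.Dict String Int × PySem.Dict String Int × List String × List String :=
  match st, p with
  | (q2a, a2q, q2p, a2p, p2q, p2a), (_i, (k, v)) =>
    let q2a := q2a.modify k [] (· ++ [v])
    let a2q := a2q.modify v [] (· ++ [k])
    let (q2p, p2q) := if q2p.contains k then (q2p, p2q)
                      else (q2p.insert k (q2p.size : Int), p2q ++ [k])
    let (a2p, p2a) := if a2p.contains v then (a2p, p2a)
                      else (a2p.insert v (a2p.size : Int), p2a ++ [v])
    (q2a, a2q, q2p, a2p, p2q, p2a)

def create_entire_question_answer_mapping_from_pair (question_answer_pair : List (String × String)) : (List (String × List String)) × (List (String × List String)) × (List (String × Int)) × (List (String × Int)) × List String × List String :=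
  let st := (PySem.List.enumerate question_answer_pair 0).foldl pvStepA
    (PySem.Dict.empty, PySem.Dict.empty, PySem.Dict.empty, PySem.Dict.empty, [], [])
  match st with
  | (q2a, a2q, q2p, a2p, p2q, p2a) => (q2a.items, a2q.items, q2p.items, a2p.items, p2q, p2a)

-- ===== PORT B =====
def create_entire_question_answer_mapping_from_pair_alt (question_answer_pair : List (String × String)) : (List (String × List String)) × (List (String × List String)) × (List (String × Int)) × (List (String × Int)) × List String × List String :=
  let pos_to_question := PySem.List.dedup (question_answer_pair.map (·.1))
  let pos_to_answer := PySem.List.dedup (question_answer_pair.map (·.2))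
  let question_to_answer := pos_to_question.map
    (fun k => (k, (question_answer_pair.filter (fun p => p.1 == k)).map (·.2)))
  let answer_to_question := pos_to_answer.map
    (fun v => (v, (question_answer_pair.filter (fun p => p.2 == v)).map (·.1)))
  let question_to_pos := (PySem.List.enumerate pos_to_question 0).map (fun ik => (ik.2, ik.1))
  let answer_to_pos := (PySem.List.enumerate pos_to_answer 0).map (fun ik => (ik.2, ik.1))
  (question_to_answer, answer_to_question, question_to_pos, answer_to_pos, pos_to_question, pos_to_answer)

-- ===== PRECONDITION & SPEC =====
def Spec_create_entire_question_answer_mapping_from_pair (question_answer_pair : List (String × String)) (out : (List (String × List String)) × (List (String × List String)) × (List (String × Int)) × (List (String × Int)) × List String × List String) : Prop := out = create_entire_question_answer_mapping_from_pair_alt question_answer_pair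
instance (question_answer_pair : List (String × String)) (out : (List (String × List String)) × (List (String × List String)) × (List (String × Int)) × (List (String × Int)) × List String × List String) : Decidable (Spec_create_entire_question_answer_mapping_from_pair question_answer_pair out) := by unfold Spec_create_entire_question_answer_mapping_from_pair; exact @instDecidableEqProd _ _ inferInstance (@instDecidableEqProd _ _ inferInstance (@instDecidableEqProd _ _ inferInstance (@instDecidableEqProd _ _ inferInstance inferInstance))) _ _

-- ===== CLAIM (what is proved, stated in full; the proofs are below) =====
def Claim_equal_create_entire_question_answer_mapping_from_pair : Prop := ∀ (question_answer_pair : List (String × String)), Dom_create_entire_question_answer_mapping_from_pair question_answer_pair → Spec_create_entire_question_answer_mapping_from_pair question_answer_pair (create_entire_question_answer_mapping_from_pair question_answer_pair)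

-- ===== LEMMAS AND PROOFS =====

-- the position-index dict determined by a key list
def pvMkPos (ks : List String) : PySem.Dict String Int :=
  PySem.Dict.mk ((PySem.List.enumerate ks 0).map (fun ik => (ik.2, ik.1)))

theorem pvMkPos_keys (ks : List String) : (pvMkPos ks).keys = ks := by
  simp [pvMkPos, PySem.Dict.keys_mk, PySem.List.map_snd_enumerate, Function.comp_def]

theorem pvMkPos_contains (ks : List String) (k : String) :
    (pvMkPos ks).contains k = decide (k ∈ ks) := by
  rw [PySem.Dict.contains_eq_decide_mem_keys, pvMkPos_keys]

theorem pvKeysModOld {ν : Type} (d : PySem.Dict String ν) (k : String) (d0 : ν) (f : ν → ν)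
    (h : k ∈ d.keys) : (d.modify k d0 f).keys = d.keys := by
  rw [PySem.Dict.keys_modify, PySem.Dict.keys_insert_of_contains]
  rw [PySem.Dict.contains_eq_decide_mem_keys]; simpa using h

theorem pvKeysModNew {ν : Type} (d : PySem.Dict String ν) (k : String) (d0 : ν) (f : ν → ν)
    (h : k ∉ d.keys) : (d.modify k d0 f).keys = d.keys ++ [k] := by
  rw [PySem.Dict.keys_modify, PySem.Dict.keys_insert_of_not_contains]
  rw [PySem.Dict.contains_eq_decide_mem_keys]; simpa using h

theorem pvMkPos_append (ks : List String) (k : String) (hk : k ∉ ks) :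
    (pvMkPos ks).insert k ((pvMkPos ks).size : Int) = pvMkPos (ks ++ [k]) := by
  apply PySem.Dict.ext
  rw [PySem.Dict.items_insert_of_not_contains]
  · simp [pvMkPos, PySem.List.enumerate_append, PySem.Dict.size,
      PySem.List.length_enumerate]
  · rw [pvMkPos_contains]; simpa using hk

-- A's fold, started in a state consistent with the invariant, stays consistent with it
theorem pvLoop_inv (l : List (String × String)) (s : Int)
    (dq da : PySem.Dict String (List String)) :
    (PySem.List.enumerate l s).foldl pvStepA
      (dq, da, pvMkPos dq.keys, pvMkPos da.keys, dq.keys, da.keys)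
    = (l.foldl (fun d p => d.modify p.1 [] (· ++ [p.2])) dq,
       l.foldl (fun d p => d.modify p.2 [] (· ++ [p.1])) da,
       pvMkPos (l.foldl (fun d p => d.modify p.1 [] (· ++ [p.2])) dq).keys,
       pvMkPos (l.foldl (fun d p => d.modify p.2 [] (· ++ [p.1])) da).keys,
       (l.foldl (fun d p => d.modify p.1 [] (· ++ [p.2])) dq).keys,
       (l.foldl (fun d p => d.modify p.2 [] (· ++ [p.1])) da).keys) := by
  induction l generalizing s dq da with
  | nil => simp [PySem.List.enumerate_nil]
  | cons p l ih =>
    obtain ⟨k, v⟩ := p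
    rw [PySem.List.enumerate_cons, List.foldl_cons, List.foldl_cons]
    have hstep : pvStepA (dq, da, pvMkPos dq.keys, pvMkPos da.keys, dq.keys, da.keys) (s, (k, v))
        = (dq.modify k [] (· ++ [v]), da.modify v [] (· ++ [k]),
           pvMkPos (dq.modify k [] (· ++ [v])).keys, pvMkPos (da.modify v [] (· ++ [k])).keys,
           (dq.modify k [] (· ++ [v])).keys, (da.modify v [] (· ++ [k])).keys) := by
      simp only [pvStepA, pvMkPos_contains]
      by_cases hk : k ∈ dq.keys <;> by_cases hv : v ∈ da.keys
      · simp [hk, hv, pvKeysModOld dq k [] _ hk, pvKeysModOld da v [] _ hv]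
      · simp [hk, hv, pvKeysModOld dq k [] _ hk, pvKeysModNew da v [] _ hv,
          pvMkPos_append _ _ hv]
      · simp [hk, hv, pvKeysModNew dq k [] _ hk, pvKeysModOld da v [] _ hv,
          pvMkPos_append _ _ hk]
      · simp [hk, hv, pvKeysModNew dq k [] _ hk, pvKeysModNew da v [] _ hv,
          pvMkPos_append _ _ hk, pvMkPos_append _ _ hv]
    rw [hstep, ih]
    simp

-- the grouping characterisation of A's first-component dict fold
theorem pvKeysFold (l : List (String × String)) :
    (l.foldl (fun d p => d.modify p.1 [] (· ++ [p.2]))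
      (PySem.Dict.empty : PySem.Dict String (List String))).keys
    = PySem.List.dedup (l.map (·.1)) := by
  simpa [PySem.Dict.keys_empty, PySem.Set.update_nil_left] using
    PySem.Dict.keys_foldl_modify_key l (fun p => p.1) [] (fun _ p v => v ++ [p.2])
      (PySem.Dict.empty : PySem.Dict String (List String))

theorem pvItemsFold (l : List (String × String)) :
    (l.foldl (fun d p => d.modify p.1 [] (· ++ [p.2]))
      (PySem.Dict.empty : PySem.Dict String (List String))).items
    = (PySem.List.dedup (l.map (·.1))).map
        (fun k => (k, (l.filter (fun p => p.1 == k)).map (·.2))) := by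
  rw [PySem.Dict.items_eq_map_keys _ ?hnd ([] : List String), pvKeysFold]
  · refine List.map_congr_left (fun k _ => ?_)
    rw [PySem.Dict.getD_foldl_modify_append, PySem.Dict.getD_empty]
    simp
  case hnd =>
    rw [pvKeysFold]; exact PySem.List.nodup_dedup (l.map (·.1))

-- the same, keyed by the second component (via the swapped list)
theorem pvItemsFoldSnd (l : List (String × String)) :
    (l.foldl (fun d p => d.modify p.2 [] (· ++ [p.1]))
      (PySem.Dict.empty : PySem.Dict String (List String))).items
    = (PySem.List.dedup (l.map (·.2))).map
        (fun v => (v, (l.filter (fun p => p.2 == v)).map (·.1))) := by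
  have hswap : l.foldl (fun d p => d.modify p.2 [] (· ++ [p.1]))
      (PySem.Dict.empty : PySem.Dict String (List String))
      = (l.map (fun p => (p.2, p.1))).foldl (fun d p => d.modify p.1 [] (· ++ [p.2]))
        PySem.Dict.empty := by
    rw [List.foldl_map]
  rw [hswap, pvItemsFold]
  simp only [List.map_map, List.filter_map, Function.comp_def]

theorem pvKeysFoldSnd (l : List (String × String)) :
    (l.foldl (fun d p => d.modify p.2 [] (· ++ [p.1]))
      (PySem.Dict.empty : PySem.Dict String (List String))).keys
    = PySem.List.dedup (l.map (·.2)) := by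
  have h := congrArg (List.map (·.1)) (pvItemsFoldSnd l)
  simpa [PySem.Dict.keys, List.map_map, Function.comp_def] using h

-- ===== VERDICT (by name: the statement is the Claim_ definition above) =====

theorem create_entire_question_answer_mapping_from_pair_spec : Claim_equal_create_entire_question_answer_mapping_from_pair := by
  intro qap _
  show _ = _
  unfold create_entire_question_answer_mapping_from_pair
    create_entire_question_answer_mapping_from_pair_alt
  have h0 : (PySem.Dict.empty : PySem.Dict String Int) = pvMkPos ((PySem.Dict.empty : PySem.Dict String (List String)).keys) := by
    apply PySem.Dict.ext; simp [pvMkPos, PySem.List.enumerate_nil, PySem.Dict.empty]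
  have hk0 : ((PySem.Dict.empty : PySem.Dict String (List String)).keys) = ([] : List String) := by
    simp [PySem.Dict.keys_empty]
  rw [show ((PySem.Dict.empty : PySem.Dict String (List String)), (PySem.Dict.empty : PySem.Dict String (List String)), (PySem.Dict.empty : PySem.Dict String Int), (PySem.Dict.empty : PySem.Dict String Int), ([] : List String), ([] : List String))
      = ((PySem.Dict.empty : PySem.Dict String (List String)), (PySem.Dict.empty : PySem.Dict String (List String)),
         pvMkPos (PySem.Dict.empty : PySem.Dict String (List String)).keys,
         pvMkPos (PySem.Dict.empty : PySem.Dict String (List String)).keys,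
         (PySem.Dict.empty : PySem.Dict String (List String)).keys,
         (PySem.Dict.empty : PySem.Dict String (List String)).keys) from by rw [← h0, hk0]]
  rw [pvLoop_inv]
  simp only [pvItemsFold, pvItemsFoldSnd, pvKeysFold, pvKeysFoldSnd, pvMkPos]
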